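-- pv_equiv track=rewrite | github.com/AlfiMuhtadii/gap-architect-ai-mvp | backend/app/services/llm_service.py | _rank_missing_skills
-- ===== SOURCE A (Python) =====
-- def _rank_missing_skills(missing: list[str], jd_text: str) -> list[str]:
--     if not missing:
--         return []
--     scored: list[tuple[int, int, int, str]] = []
--     jd = jd_text.lower()
--     for idx, skill in enumerate(missing):
--         s = str(skill).strip()
--         if not s:
--             continue
--         s_lower = s.lower()
--         freq = jd.count(s_lower)
--         first_pos = jd.find(s_lower)
--         if first_pos < 0:
--             first_pos = 10**9
--         scored.append((freq, first_pos, idx, s))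
--     scored.sort(key=lambda x: (-x[0], x[1], x[2]))
--     return [s for _, _, _, s in scored][:3]
-- ===== SOURCE B (Python) =====
-- def _rank_missing_skills(missing: list[str], jd_text: str) -> list[str]:
--     jd = jd_text.lower()
--     scored: list[tuple[int, int, int, str]] = []
--     for idx, skill in enumerate(missing):
--         s = str(skill).strip()
--         if not s:
--             continue
--         p = s.lower()
--         m = len(p)
--         # one find-driven pass computes the non-overlapping count and the
--         # first position together (instead of separate .count and .find passes)
--         freq = 0
--         first = 10**9
--         i = 0
--         while True:
--             j = jd.find(p, i)
--             if j < 0: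
--                 break
--             if freq == 0:
--                 first = j
--             freq += 1
--             i = j + m
--         scored.append((freq, first, idx, s))
--     # top 3 by repeated first-minimum extraction instead of a full sort
--     top: list[str] = []
--     for _ in range(3):
--         if not scored:
--             break
--         best = min(scored, key=lambda x: (-x[0], x[1], x[2]))
--         top.append(best[3])
--         scored.remove(best)
--     return top
-- ===== Notes on version B (the rewrite author's own statement) =====
-- stated objective: alternative
-- what changed: B computes each skill's frequency and first position in one find-driven pass over the text instead of two separate full passes (.count then .find), and picks the top 3 by three first-minimum extractions instead of fully sorting the scored list.
import Mathlib
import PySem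

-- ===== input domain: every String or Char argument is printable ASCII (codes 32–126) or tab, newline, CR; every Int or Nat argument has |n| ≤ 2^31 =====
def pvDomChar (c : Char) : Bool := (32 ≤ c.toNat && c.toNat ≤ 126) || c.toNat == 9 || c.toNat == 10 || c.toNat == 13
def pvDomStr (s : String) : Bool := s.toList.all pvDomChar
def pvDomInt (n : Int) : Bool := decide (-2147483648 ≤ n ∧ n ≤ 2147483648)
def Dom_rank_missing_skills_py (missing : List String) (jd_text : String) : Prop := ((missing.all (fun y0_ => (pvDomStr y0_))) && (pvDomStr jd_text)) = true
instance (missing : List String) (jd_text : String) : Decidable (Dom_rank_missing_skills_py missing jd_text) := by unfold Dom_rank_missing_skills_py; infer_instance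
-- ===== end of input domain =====

-- B replaces the two per-skill text passes (.count then .find) by ONE left-to-right scan that
-- yields frequency and first position together, and replaces the full sort by three
-- first-minimum extractions (top-3 selection); return values are proved identical.

-- ===== PORT A =====
-- sort key of A: lambda x: (-x[0], x[1], x[2]) — Python tuple order = lexicographic
def pvKey (x : Int × Int × Int × String) : Lex (Int × Lex (Int × Int)) :=
  toLex (-x.1, toLex (x.2.1, x.2.2.1))

-- the 'for idx, skill in enumerate(missing)' scoring loop of A
def pvScoreA (jd : String) : List String → Nat → List (Int × Int × Int × String)
  | [], _ => []
  | skill :: rest, idx =>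
    let s := PySem.Str.strip skill
    if s.toList = [] then pvScoreA jd rest (idx + 1)
    else
      let sl := PySem.Str.lower s
      let freq : Int := PySem.Str.count jd sl
      let fp0 := PySem.Str.find jd sl
      let fp := if fp0 < 0 then 10 ^ 9 else fp0
      (freq, fp, (idx : Int), s) :: pvScoreA jd rest (idx + 1)

def rank_missing_skills_py (missing : List String) (jd_text : String) : List String :=
  if missing = [] then []
  else
    let jd := PySem.Str.lower jd_text
    let scored := pvScoreA jd missing 0
    ((PySem.List.sorted scored pvKey).map (fun x => x.2.2.2)).take 3

-- ===== PORT B =====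
-- B's 'while True' loop: one jd.find(p, i)-driven pass computing (freq, first) together,
-- jumping len(p) past each match; the fuel argument only makes the loop total (each
-- iteration moves i forward, so jd.length + 1 steps always suffice)
def pvFindLoop (p jd : List Char) : Nat → Nat → Int → Int → Int × Int
  | 0, _, freq, first => (freq, first)
  | fuel + 1, i, freq, first =>
    let j := PySem.Chars.findFrom jd p (i : Int)
    if j < 0 then (freq, first)
    else pvFindLoop p jd fuel (j.toNat + p.length) (freq + 1) (if freq = 0 then j else first)

def pvScoreB (jd : List Char) : List String → Nat → List (Int × Int × Int × String)
  | [], _ => []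
  | skill :: rest, idx =>
    let s := PySem.Str.strip skill
    if s.toList = [] then pvScoreB jd rest (idx + 1)
    else
      let p := (PySem.Str.lower s).toList
      let r := pvFindLoop p jd (jd.length + 1) 0 0 (10 ^ 9)
      (r.1, r.2, (idx : Int), s) :: pvScoreB jd rest (idx + 1)

-- 'for _ in range(3): best = min(scored, key=…); top.append(best[3]); scored.remove(best)'
def pvPick : Nat → List (Int × Int × Int × String) → List String
  | 0, _ => []
  | n + 1, scored =>
    match PySem.List.min? scored pvKey with
    | none => []
    | some best => best.2.2.2 :: pvPick n ((PySem.List.remove? scored best).getD [])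

def rank_missing_skills_py_alt (missing : List String) (jd_text : String) : List String :=
  let jd := (PySem.Str.lower jd_text).toList
  pvPick 3 (pvScoreB jd missing 0)

-- ===== PRECONDITION & SPEC =====
def Spec_rank_missing_skills_py (missing : List String) (jd_text : String) (out : List String) : Prop := out = rank_missing_skills_py_alt missing jd_text
instance (missing : List String) (jd_text : String) (out : List String) : Decidable (Spec_rank_missing_skills_py missing jd_text out) := by unfold Spec_rank_missing_skills_py; infer_instance

-- ===== CLAIM (what is proved, stated in full; the proofs are below) =====
def Claim_equal_rank_missing_skills_py : Prop := ∀ (missing : List String) (jd_text : String), Dom_rank_missing_skills_py missing jd_text → Spec_rank_missing_skills_py missing jd_text (rank_missing_skills_py missing jd_text)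

-- ===== LEMMAS AND PROOFS =====

-- proof device: the character-by-character scan both loops refine
def pvScan (p : List Char) : List Char → Nat → Int → Int → Int × Int
  | [], _, freq, first => (freq, first)
  | c :: t, i, freq, first =>
    if p.isPrefixOf (c :: t) then
      pvScan p (t.drop (p.length - 1)) (i + p.length) (freq + 1) (if freq = 0 then (i : Int) else first)
    else pvScan p t (i + 1) freq first
  termination_by l => l.length
  decreasing_by
    · simp only [List.length_drop, List.length_cons]; omega
    · simp only [List.length_cons]; omega

lemma pv_countgo_acc (p : List Char) : ∀ (fuel : Nat) (l : List Char) (acc : Nat),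
    PySem.Chars.count.go p fuel l acc = acc + PySem.Chars.count.go p fuel l 0 := by
  intro fuel
  induction fuel with
  | zero => intro l acc; simp [PySem.Chars.count.go]
  | succ n ih =>
    intro l acc
    cases l with
    | nil => simp [PySem.Chars.count.go]
    | cons c t =>
      rw [PySem.Chars.count.go, PySem.Chars.count.go]
      split
      · rw [ih _ (acc+1), ih _ 1]; omega
      · exact ih t acc

lemma pvScan_fst (p : List Char) (hp : p ≠ []) : ∀ (fuel : Nat) (l : List Char), l.length ≤ fuel →
    ∀ (i : Nat) (freq first : Int),
    (pvScan p l i freq first).1 = freq + (PySem.Chars.count.go p fuel l 0 : Int) := by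
  have hp1 : 1 ≤ p.length := List.length_pos_of_ne_nil hp
  intro fuel
  induction fuel with
  | zero =>
    intro l hl i freq first
    have : l = [] := by cases l <;> simp_all
    subst this
    simp [pvScan, PySem.Chars.count.go]
  | succ n ih =>
    intro l hl i freq first
    cases l with
    | nil => simp [pvScan, PySem.Chars.count.go]
    | cons c t =>
      rw [pvScan, PySem.Chars.count.go]
      split
      · have hdrop : (c :: t).drop p.length = t.drop (p.length - 1) := by
          rw [show p.length = (p.length - 1) + 1 from (Nat.succ_pred_eq_of_pos hp1).symm]
          simp
        rw [← hdrop, pv_countgo_acc]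
        rw [ih ((c :: t).drop p.length) (by simp only [List.length_drop, List.length_cons] at hl ⊢; omega)]
        push_cast; ring
      · rw [ih t (by simpa using Nat.le_of_succ_le_succ hl)]

lemma pvScan_snd_ne (p : List Char) : ∀ (n : Nat) (l : List Char), l.length ≤ n →
    ∀ (i : Nat) (freq first : Int), 0 < freq → (pvScan p l i freq first).2 = first := by
  intro n
  induction n with
  | zero =>
    intro l hl i freq first hf
    have : l = [] := by cases l <;> simp_all
    subst this; simp [pvScan]
  | succ n ih =>
    intro l hl i freq first hf
    cases l with
    | nil => simp [pvScan]
    | cons c t =>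
      rw [pvScan]
      split
      · rw [if_neg (by omega)]
        exact ih _ (by simp only [List.length_drop, List.length_cons] at hl ⊢; omega) _ _ _ (by omega)
      · exact ih t (by simpa using Nat.le_of_succ_le_succ hl) _ _ _ hf

lemma pv_findgo_cases (p : List Char) : ∀ (l : List Char) (k : Nat),
    PySem.Chars.find.go p l k = -1 ∨ 0 ≤ PySem.Chars.find.go p l k := by
  intro l
  induction l with
  | nil => intro k; rw [PySem.Chars.find.go]; split <;> simp
  | cons c t ih =>
    intro k; rw [PySem.Chars.find.go]; split
    · right; positivity
    · exact ih (k + 1)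

lemma pvScan_snd (p : List Char) (hp : p ≠ []) : ∀ (n : Nat) (l : List Char), l.length ≤ n →
    ∀ (i : Nat) (first : Int),
    (pvScan p l i 0 first).2 =
      if PySem.Chars.find.go p l i = -1 then first else PySem.Chars.find.go p l i := by
  intro n
  induction n with
  | zero =>
    intro l hl i first
    have : l = [] := by cases l <;> simp_all
    subst this
    rw [pvScan, PySem.Chars.find.go]
    simp [hp]
  | succ n ih =>
    intro l hl i first
    cases l with
    | nil =>
      rw [pvScan, PySem.Chars.find.go]
      simp [hp]
    | cons c t =>
      rw [pvScan, PySem.Chars.find.go]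
      split
      · rw [if_pos rfl]
        rw [pvScan_snd_ne p (t.drop (p.length - 1)).length _ le_rfl _ _ _ (by omega)]
        rw [if_neg (by omega)]
      · exact ih t (by simpa using Nat.le_of_succ_le_succ hl) (i + 1) first

-- find.go only shifts the reported index by its start parameter
lemma pv_findgo_shift (p : List Char) (hp : p ≠ []) : ∀ (l : List Char) (k : Nat),
    PySem.Chars.find.go p l k =
      if PySem.Chars.find.go p l 0 = -1 then -1 else (k : Int) + PySem.Chars.find.go p l 0 := by
  intro l
  induction l with
  | nil =>
    intro k
    rw [PySem.Chars.find.go, PySem.Chars.find.go]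
    simp [hp]
  | cons c t ih =>
    intro k
    rw [PySem.Chars.find.go]
    conv_rhs => rw [PySem.Chars.find.go]
    split
    · simp
    · rw [ih (k + 1), ih 1]
      rcases pv_findgo_cases p t 0 with h | h
      · simp [h]
      · rw [if_neg (by omega), if_neg (by omega), if_neg (by omega)]
        push_cast; ring

-- no match ahead: the scan changes nothing
lemma pvScan_nomatch (p : List Char) : ∀ (l : List Char) (i : Nat) (freq first : Int),
    PySem.Chars.find.go p l i = -1 → pvScan p l i freq first = (freq, first) := by
  intro l
  induction l with
  | nil => intro i freq first _; rw [pvScan]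
  | cons c t ih =>
    intro i freq first h
    rw [PySem.Chars.find.go] at h
    rw [pvScan]
    split
    · rename_i hpre; rw [if_pos hpre] at h; omega
    · rename_i hpre; rw [if_neg hpre] at h; exact ih (i + 1) freq first h

-- a match at absolute position x: the scan jumps to x + len(p) in one step
lemma pvScan_match (p : List Char) (hp : p ≠ []) : ∀ (l : List Char) (i : Nat) (freq first x : Int),
    PySem.Chars.find.go p l i = x → 0 ≤ x →
    pvScan p l i freq first =
      pvScan p (l.drop (x.toNat - i + p.length)) (x.toNat + p.length) (freq + 1)
        (if freq = 0 then x else first) := by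
  have hp1 : 1 ≤ p.length := List.length_pos_of_ne_nil hp
  intro l
  induction l with
  | nil =>
    intro i freq first x h hx
    rw [PySem.Chars.find.go] at h
    rw [if_neg (by simpa using hp)] at h
    omega
  | cons c t ih =>
    intro i freq first x h hx
    rw [PySem.Chars.find.go] at h
    rw [pvScan]
    split
    · rename_i hpre
      rw [if_pos hpre] at h
      rw [← h]
      simp only [Int.toNat_natCast]
      have h1 : i - i + p.length = p.length := by omega
      rw [h1]
      have h3 : (c :: t).drop p.length = t.drop (p.length - 1) := by
        rw [show p.length = (p.length - 1) + 1 from by omega]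
        simp
      rw [h3]
    · rename_i hpre
      rw [if_neg hpre] at h
      have hge : (i : Int) + 1 ≤ x := by
        rw [pv_findgo_shift p hp t (i + 1)] at h
        rcases pv_findgo_cases p t 0 with h0 | h0
        · rw [if_pos h0] at h; omega
        · rw [if_neg (by omega)] at h; push_cast at h; omega
      rw [ih (i + 1) freq first x h hx]
      have h4 : x.toNat - i + p.length = (x.toNat - (i + 1) + p.length) + 1 := by omega
      rw [h4]
      simp

-- jd.find(p, i) for a nonnegative start = find.go from position i
lemma pv_findFrom_eq (p jd : List Char) (hp : p ≠ []) (i : Nat) :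
    PySem.Chars.findFrom jd p (i : Int) none = PySem.Chars.find.go p (jd.drop i) i := by
  by_cases hi : i ≤ jd.length
  · rw [PySem.Chars.findFrom_natCast jd p i hi]
    rw [show PySem.Chars.find (jd.drop i) p = PySem.Chars.find.go p (jd.drop i) 0 from rfl]
    rw [pv_findgo_shift p hp (jd.drop i) i]
  · have hdrop : jd.drop i = [] := List.drop_eq_nil_of_le (by omega)
    rw [hdrop, PySem.Chars.find.go]
    rw [if_neg (by simpa using hp)]
    rw [PySem.Chars.findFrom]
    rw [if_pos (by omega)]

-- the find-driven loop computes exactly what the character scan computes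
lemma pvFindLoop_eq_pvScan (p jd : List Char) (hp : p ≠ []) :
    ∀ (fuel i : Nat) (freq first : Int), jd.length + 1 ≤ fuel + i →
    pvFindLoop p jd fuel i freq first = pvScan p (jd.drop i) i freq first := by
  have hp1 : 1 ≤ p.length := List.length_pos_of_ne_nil hp
  intro fuel
  induction fuel with
  | zero =>
    intro i freq first hfi
    have hdrop : jd.drop i = [] := List.drop_eq_nil_of_le (by omega)
    rw [hdrop, pvFindLoop, pvScan]
  | succ n ih =>
    intro i freq first hfi
    rw [pvFindLoop]
    simp only [pv_findFrom_eq p jd hp i]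
    rcases pv_findgo_cases p (jd.drop i) i with h | h
    · rw [if_pos (by rw [h]; norm_num)]
      exact (pvScan_nomatch p (jd.drop i) i freq first h).symm
    · set x := PySem.Chars.find.go p (jd.drop i) i with hx
      rw [if_neg (by omega)]
      have hgei : (i : Int) ≤ x := by
        rw [hx, pv_findgo_shift p hp (jd.drop i) i]
        rcases pv_findgo_cases p (jd.drop i) 0 with h0 | h0
        · rw [hx, pv_findgo_shift p hp (jd.drop i) i] at h
          rw [if_pos h0] at h; omega
        · rw [if_neg (by omega)]; omega
      rw [pvScan_match p hp (jd.drop i) i freq first x rfl h]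
      rw [List.drop_drop]
      have harith : i + (x.toNat - i + p.length) = x.toNat + p.length := by omega
      rw [harith]
      exact ih (x.toNat + p.length) (freq + 1) (if freq = 0 then x else first) (by omega)

lemma pvScore_eq (jd : String) : ∀ (l : List String) (idx : Nat),
    pvScoreB jd.toList l idx = pvScoreA jd l idx := by
  intro l
  induction l with
  | nil => intro idx; rfl
  | cons skill rest ih =>
    intro idx
    rw [pvScoreA, pvScoreB]
    by_cases hs : (PySem.Str.strip skill).toList = []
    · simp only [hs]
      exact ih (idx + 1)
    · simp only [hs, ite_false]
      have hp : (PySem.Str.lower (PySem.Str.strip skill)).toList ≠ [] := by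
        simp only [PySem.Str.toList_lower]
        intro h
        apply hs
        have := congrArg List.length h
        simp only [PySem.Chars.lower] at this
        simpa using List.eq_nil_of_length_eq_zero (by simpa using this)
      have hloop : pvFindLoop (PySem.Str.lower (PySem.Str.strip skill)).toList jd.toList
          (jd.toList.length + 1) 0 0 (10 ^ 9)
          = pvScan (PySem.Str.lower (PySem.Str.strip skill)).toList jd.toList 0 0 (10 ^ 9) := by
        rw [pvFindLoop_eq_pvScan _ _ hp (jd.toList.length + 1) 0 0 (10 ^ 9) (by omega)]
        rw [List.drop_zero]
      have h1 : (pvScan (PySem.Str.lower (PySem.Str.strip skill)).toList jd.toList 0 0 (10 ^ 9)).1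
          = (PySem.Str.count jd (PySem.Str.lower (PySem.Str.strip skill)) : Int) := by
        rw [PySem.Str.count_eq, PySem.Chars.count, if_neg (by simpa using hp)]
        simpa using pvScan_fst _ hp jd.toList.length jd.toList le_rfl 0 0 (10 ^ 9)
      have h2 : (pvScan (PySem.Str.lower (PySem.Str.strip skill)).toList jd.toList 0 0 (10 ^ 9)).2
          = (if PySem.Str.find jd (PySem.Str.lower (PySem.Str.strip skill)) < 0 then 10 ^ 9
             else PySem.Str.find jd (PySem.Str.lower (PySem.Str.strip skill))) := by
        rw [PySem.Str.find_eq, PySem.Chars.find]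
        rw [pvScan_snd _ hp jd.toList.length jd.toList le_rfl 0 (10 ^ 9)]
        rcases pv_findgo_cases (PySem.Str.lower (PySem.Str.strip skill)).toList jd.toList 0 with h | h
        · rw [h]; norm_num
        · rw [if_neg (by omega), if_neg (by omega)]
      rw [hloop, h1, h2, ih (idx + 1)]


lemma pv_remove_getD {α : Type} [BEq α] [LawfulBEq α] (l : List α) (v : α) (h : v ∈ l) :
    (PySem.List.remove? l v).getD [] = l.erase v := by
  induction l with
  | nil => simp at h
  | cons a t ih =>
    rw [PySem.List.remove?, List.idxOf?_cons, List.erase_cons]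
    by_cases hav : a = v
    · simp [hav]
    · have hbeq : (a == v) = false := by simpa using hav
      have hvt : v ∈ t := by
        rcases List.mem_cons.mp h with h1 | h1
        · exact absurd h1.symm hav
        · exact h1
      obtain ⟨k, hk⟩ := Option.isSome_iff_exists.mp (List.isSome_idxOf?.mpr hvt)
      have iht := ih hvt
      rw [PySem.List.remove?, hk] at iht
      simp only [hbeq, hk]
      simp only [Option.map_some, Option.getD_some] at iht ⊢
      simp [List.eraseIdx_cons_succ, iht]

-- idx components of the scored list are ≥ idx and strictly increasing
lemma pvScoreA_idx (jd : String) : ∀ (l : List String) (idx : Nat),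
    (∀ e ∈ pvScoreA jd l idx, (idx : Int) ≤ e.2.2.1) ∧
      List.Pairwise (fun a b => a.2.2.1 < b.2.2.1) (pvScoreA jd l idx) := by
  intro l
  induction l with
  | nil => intro idx; simp [pvScoreA]
  | cons skill rest ih =>
    intro idx
    rw [pvScoreA]
    split
    · refine ⟨fun e he => ?_, (ih (idx + 1)).2⟩
      have := (ih (idx + 1)).1 e he
      push_cast at this ⊢; omega
    · refine ⟨fun e he => ?_, ?_⟩
      · rcases List.mem_cons.mp he with h | h
        · subst h; simp
        · have := (ih (idx + 1)).1 e h
          push_cast at this ⊢; omega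
      · refine List.pairwise_cons.mpr ⟨fun e he => ?_, (ih (idx + 1)).2⟩
        have := (ih (idx + 1)).1 e he
        push_cast at this ⊢; omega

lemma pvKey_ne_of_idx_ne (a b : Int × Int × Int × String) (h : a.2.2.1 ≠ b.2.2.1) :
    pvKey a ≠ pvKey b := by
  intro hk
  apply h
  have := toLex.injective hk
  have h2 := congrArg Prod.snd this
  have := toLex.injective h2
  exact congrArg Prod.snd this

lemma pv_inj_on : ∀ (l : List (Int × Int × Int × String)),
    List.Pairwise (fun a b => pvKey a ≠ pvKey b) l →
    ∀ x ∈ l, ∀ y ∈ l, pvKey x = pvKey y → x = y := by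
  intro l
  induction l with
  | nil => intro _ x hx; simp at hx
  | cons a t ih =>
    intro hpw x hx y hy hk
    obtain ⟨ha, ht⟩ := List.pairwise_cons.mp hpw
    rcases List.mem_cons.mp hx with hx1 | hx1 <;> rcases List.mem_cons.mp hy with hy1 | hy1
    · rw [hx1, hy1]
    · subst hx1; exact absurd hk (ha y hy1)
    · subst hy1; exact absurd hk.symm (ha x hx1)
    · exact ih ht x hx1 y hy1 hk

-- selection = take of sort, under pairwise-distinct keys
lemma pvPick_eq_sorted : ∀ (n : Nat) (scored : List (Int × Int × Int × String)),
    List.Pairwise (fun a b => pvKey a ≠ pvKey b) scored →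
    pvPick n scored = ((PySem.List.sorted scored pvKey).map (fun x => x.2.2.2)).take n := by
  intro n
  induction n with
  | zero => intro scored _; simp [pvPick]
  | succ n ih =>
    intro scored hpw
    by_cases hnil : scored = []
    · subst hnil
      simp [pvPick, PySem.List.min?, PySem.List.sorted]
    · cases hs : PySem.List.sorted scored pvKey with
      | nil => exact absurd ((PySem.List.sorted_eq_nil_iff scored pvKey false).mp hs) hnil
      | cons m t =>
        have hperm : (m :: t).Perm scored := hs ▸ PySem.List.sorted_perm scored pvKey false
        have hmmem : m ∈ scored := hperm.subset List.mem_cons_self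
        cases hmin : PySem.List.min? scored pvKey with
        | none => exact absurd ((PySem.List.min?_eq_none_iff scored pvKey).mp hmin) hnil
        | some best =>
          have hbmem : best ∈ scored := PySem.List.min?_mem hmin
          have hbm : best = m := by
            refine pv_inj_on scored hpw best hbmem m hmmem (le_antisymm
              (PySem.List.min?_isMin hmin m hmmem)
              (PySem.List.key_head_sorted_le scored pvKey hs best hbmem))
          subst hbm
          -- best has been substituted for m throughout
          have hpwmt : List.Pairwise (fun a b => pvKey a ≠ pvKey b) (best :: t) :=
            (List.Perm.pairwise_iff (fun h => h.symm) hperm).mpr hpw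
          have hlt : List.Pairwise (fun a b => pvKey a < pvKey b) (best :: t) := by
            have hle := hs ▸ PySem.List.sorted_pairwise scored pvKey
            exact (hle.and hpwmt).imp (fun ⟨h1, h2⟩ => lt_of_le_of_ne h1 h2)
          have hrest : (PySem.List.remove? scored best).getD [] = scored.erase best :=
            pv_remove_getD scored best hbmem
          have htperm : t.Perm (scored.erase best) := by
            have h0 := hperm.erase best
            rwa [List.erase_cons_head] at h0
          have hsorted_rest : PySem.List.sorted (scored.erase best) pvKey = t :=
            PySem.List.sorted_eq_of_perm_of_pairwise_lt _ _ pvKey htperm (List.pairwise_cons.mp hlt).2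
          have hpw_rest : List.Pairwise (fun a b => pvKey a ≠ pvKey b) (scored.erase best) :=
            List.Pairwise.sublist (List.erase_sublist) hpw
          have hstep : pvPick (n + 1) scored
              = best.2.2.2 :: pvPick n ((PySem.List.remove? scored best).getD []) := by
            rw [pvPick, hmin]
          rw [hstep, hrest, ih (scored.erase best) hpw_rest, hsorted_rest]
          simp

-- ===== VERDICT (by name: the statement is the Claim_ definition above) =====
theorem rank_missing_skills_py_spec : Claim_equal_rank_missing_skills_py := by
  intro missing jd_text _
  unfold Spec_rank_missing_skills_py rank_missing_skills_py rank_missing_skills_py_alt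
  dsimp only
  rw [pvScore_eq (PySem.Str.lower jd_text) missing 0]
  have hpw : List.Pairwise (fun a b => pvKey a ≠ pvKey b)
      (pvScoreA (PySem.Str.lower jd_text) missing 0) :=
    (pvScoreA_idx (PySem.Str.lower jd_text) missing 0).2.imp (fun h => pvKey_ne_of_idx_ne _ _ (ne_of_lt h))
  rw [pvPick_eq_sorted 3 _ hpw]
  split
  · rename_i h; subst h; rfl
  · rfl
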